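-- pv_equiv track=rewrite | github.com/arthurlemon/topic-models-SHS | Code/dim.py | tri_annee
-- ===== SOURCE A (Python) =====
-- def tri_annee(Corpus_filtre):
--     """On trie le corpus selon les années
--         Output :
--         - time_slices = liste où chaque élément contient le nombre d'articles par année
--         - articles_par_annee = liste où chaque élément est un tuple du type (année, [liste des tokens des articles de cette année])"""
--     time_slices = []  # chaque élément compte le nombre d'articles à chaque time step dans l'ordre croissant des années
--     articles_par_annee = {}  # contient les tokens des articles pour chaque année de publication
--     for element in Corpus_filtre:
--         annee = element[0]
--         if annee in articles_par_annee:
--             articles_par_annee[annee].append(element[1])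
--         else:
--             articles_par_annee[annee] = [element[1]]
--
--     articles_par_année_sorted = sorted(articles_par_annee.items())  # ordonnement par année
--
--     for annee in range(len(articles_par_année_sorted)):
--         time_slices.append(len(articles_par_année_sorted[annee][1]))
--     return time_slices, articles_par_année_sorted
-- ===== SOURCE B (Python) =====
-- def tri_annee(Corpus_filtre):
--     """Same result as A: sorted distinct years, each paired with its articles'
--     tokens in corpus order; no intermediate dict."""
--     annees = sorted({e[0] for e in Corpus_filtre})
--     articles_par_annee_sorted = [
--         (annee, [e[1] for e in Corpus_filtre if e[0] == annee]) for annee in annees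
--     ]
--     time_slices = [len(tokens) for _, tokens in articles_par_annee_sorted]
--     return time_slices, articles_par_annee_sorted
-- ===== Notes on version B (the rewrite author's own statement) =====
-- stated objective: simpler
-- what changed: Replaces the dict grouping pass plus items-sort plus index loop by sorting the distinct years once and building each year's token list with a comprehension filter; no dict at all.
import Mathlib
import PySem

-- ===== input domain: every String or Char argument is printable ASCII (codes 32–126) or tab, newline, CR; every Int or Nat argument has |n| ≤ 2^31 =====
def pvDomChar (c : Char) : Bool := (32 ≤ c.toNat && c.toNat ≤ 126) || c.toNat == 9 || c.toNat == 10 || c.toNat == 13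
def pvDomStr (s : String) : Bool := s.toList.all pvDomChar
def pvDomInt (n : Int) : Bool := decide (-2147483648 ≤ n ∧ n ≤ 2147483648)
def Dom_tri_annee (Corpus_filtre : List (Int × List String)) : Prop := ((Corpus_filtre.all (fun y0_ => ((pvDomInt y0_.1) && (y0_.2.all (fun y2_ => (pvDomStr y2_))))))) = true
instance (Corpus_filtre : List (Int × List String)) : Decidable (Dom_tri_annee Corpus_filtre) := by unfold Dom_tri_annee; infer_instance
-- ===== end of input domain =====

-- B groups by sorting the distinct years and filtering the corpus per year (no dict): a simpler decomposition, same value.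

-- ===== PORT A =====
-- the grouping loop of A ('if annee in d: d[annee].append(...) else: d[annee] = [...]')
def triAnneeBuild (Corpus_filtre : List (Int × List String)) :
    PySem.Dict Int (List (List String)) :=
  Corpus_filtre.foldl (fun d element =>
    if d.contains element.1 then
      d.insert element.1 (d.getD element.1 [] ++ [element.2])
    else
      d.insert element.1 [element.2]) PySem.Dict.empty

def tri_annee (Corpus_filtre : List (Int × List String)) :
    List Int × (List (Int × List (List String))) :=
  let articles_par_annee := triAnneeBuild Corpus_filtre
  -- sorted(d.items()): dict keys are distinct, so Python's tuple comparison never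
  -- reaches the second component; sorting by the year key is exact here
  let articles_sorted := PySem.List.sorted articles_par_annee.items (fun p => p.1) false
  -- for annee in range(len(...)): time_slices.append(len(...[annee][1]));
  -- the index is always in range, so pyGetD's default is never reached (exact)
  let time_slices := (PySem.List.pyRange 0 (PySem.List.len articles_sorted) 1).foldl
    (fun ts i => ts ++ [((PySem.List.pyGetD articles_sorted i (0, [])).2.length : Int)])
    ([] : List Int)
  (time_slices, articles_sorted)

-- ===== PORT B =====
def tri_annee_alt (Corpus_filtre : List (Int × List String)) :
    List Int × (List (Int × List (List String))) :=
  let annees := PySem.List.sorted (PySem.Set.ofList (Corpus_filtre.map (fun e => e.1)))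
    (fun y => y) false
  let articles_par_annee_sorted := annees.map (fun annee =>
    (annee, (Corpus_filtre.filter (fun e => e.1 == annee)).map (fun e => e.2)))
  let time_slices := articles_par_annee_sorted.map (fun p => (p.2.length : Int))
  (time_slices, articles_par_annee_sorted)

-- ===== PRECONDITION & SPEC =====
def Spec_tri_annee (Corpus_filtre : List (Int × List String)) (out : List Int × (List (Int × List (List String)))) : Prop := out = tri_annee_alt Corpus_filtre
instance (Corpus_filtre : List (Int × List String)) (out : List Int × (List (Int × List (List String)))) : Decidable (Spec_tri_annee Corpus_filtre out) := by unfold Spec_tri_annee; infer_instance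

-- ===== CLAIM (what is proved, stated in full; the proofs are below) =====
def Claim_equal_tri_annee : Prop := ∀ (Corpus_filtre : List (Int × List String)), Dom_tri_annee Corpus_filtre → Spec_tri_annee Corpus_filtre (tri_annee Corpus_filtre)

-- ===== LEMMAS AND PROOFS =====

-- the grouping fold's step function is a single keyed insert
theorem triAnneeBuild_eq_foldl_insert (Corpus_filtre : List (Int × List String)) :
    triAnneeBuild Corpus_filtre =
      Corpus_filtre.foldl (fun d element =>
        d.insert element.1
          (if d.contains element.1 then d.getD element.1 [] ++ [element.2]
           else [element.2])) PySem.Dict.empty := by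
  unfold triAnneeBuild
  congr 1
  funext d element
  split <;> rfl

-- value invariant of the grouping loop
theorem getD_triAnneeBuild_aux (C : List (Int × List String))
    (d : PySem.Dict Int (List (List String))) (y : Int) :
    (C.foldl (fun d element =>
      if d.contains element.1 then
        d.insert element.1 (d.getD element.1 [] ++ [element.2])
      else
        d.insert element.1 [element.2]) d).getD y [] =
    d.getD y [] ++ (C.filter (fun e => e.1 == y)).map (fun e => e.2) := by
  induction C generalizing d with
  | nil => simp
  | cons hd tl ih =>
    simp only [List.foldl_cons, List.filter_cons]
    rw [ih]
    by_cases hy : hd.1 = y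
    · subst hy
      by_cases hc : d.contains hd.1
      · simp [hc]
      · have h0 : d.getD hd.1 [] = [] :=
          PySem.Dict.getD_of_not_contains d [] (by simpa using hc)
        simp [hc, h0]
    · by_cases hc : d.contains hd.1 <;>
        simp [hc, PySem.Dict.getD_insert, hy, Ne.symm hy]

theorem getD_triAnneeBuild (C : List (Int × List String)) (y : Int) :
    (triAnneeBuild C).getD y [] = (C.filter (fun e => e.1 == y)).map (fun e => e.2) := by
  unfold triAnneeBuild
  rw [getD_triAnneeBuild_aux]
  simp

theorem keys_triAnneeBuild (Corpus_filtre : List (Int × List String)) :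
    (triAnneeBuild Corpus_filtre).keys = PySem.Set.ofList (Corpus_filtre.map (fun e => e.1)) := by
  rw [triAnneeBuild_eq_foldl_insert,
    PySem.Dict.keys_foldl_insert_key Corpus_filtre (fun e => e.1)
      (fun d e => if d.contains e.1 = true then d.getD e.1 [] ++ [e.2] else [e.2])
      PySem.Dict.empty]
  simp [PySem.Set.update_nil_left, PySem.Dict.keys_empty]

theorem nodup_keys_triAnneeBuild (C : List (Int × List String)) :
    (triAnneeBuild C).keys.Nodup := by
  rw [keys_triAnneeBuild]; exact PySem.Set.nodup_ofList _

-- the dict's item list is exactly B's grouping function mapped over the distinct years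
theorem items_triAnneeBuild (C : List (Int × List String)) :
    (triAnneeBuild C).items = (PySem.Set.ofList (C.map (fun e => e.1))).map
      (fun y => (y, (C.filter (fun e => e.1 == y)).map (fun e => e.2))) := by
  rw [PySem.Dict.items_eq_map_keys _ (nodup_keys_triAnneeBuild C) [],
    keys_triAnneeBuild]
  exact List.map_congr_left (fun y _ => by rw [getD_triAnneeBuild])

-- the sorted item list IS B's article list
theorem sorted_items_eq (C : List (Int × List String)) :
    PySem.List.sorted (triAnneeBuild C).items (fun p => p.1) false =
      (PySem.List.sorted (PySem.Set.ofList (C.map (fun e => e.1))) (fun y => y) false).map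
        (fun annee => (annee, (C.filter (fun e => e.1 == annee)).map (fun e => e.2))) := by
  apply PySem.List.sorted_eq_of_perm_of_pairwise_lt
  · rw [items_triAnneeBuild]
    exact (PySem.List.sorted_perm _ _ _).map _
  · exact List.Pairwise.map _ (fun a b h => h)
      (PySem.List.sorted_ofList_pairwise_lt (C.map (fun e => e.1)))

-- the append-in-a-loop form of a map
theorem foldl_append_singleton {α β : Type} (f : α → β) (l : List α) (acc : List β) :
    l.foldl (fun ts x => ts ++ [f x]) acc = acc ++ l.map f := by
  induction l generalizing acc with
  | nil => simp
  | cons hd tl ih => simp [ih]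

-- ===== VERDICT (by name: the statement is the Claim_ definition above) =====
theorem tri_annee_spec : Claim_equal_tri_annee := by
  intro C _
  show tri_annee C = tri_annee_alt C
  simp only [tri_annee, tri_annee_alt]
  rw [sorted_items_eq]
  refine Prod.ext ?_ rfl
  rw [PySem.List.foldl_pyRange_zero_pyGetD _ (0, [])
    (fun (ts : List Int) (p : Int × List (List String)) => ts ++ [(p.2.length : Int)]) [],
    foldl_append_singleton]
  simp
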